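-- pv_equiv track=rewrite | github.com/tnvAMP/ali | app.py | calculate_painting_time
-- ===== SOURCE A (Python) =====
-- def calculate_painting_time (colors: list) -> int:
--     result = 2
--     if colors == []:
--         return 0
--     for i in range(len(colors) - 1):
--         if colors[i] == colors[i + 1]:
--             result += 2
--         else:
--             result += 2 + 1
--     return result
-- ===== SOURCE B (Python) =====
-- from itertools import groupby
--
-- def calculate_painting_time(colors: list) -> int:
--     if colors == []:
--         return 0
--     runs = sum(1 for _ in groupby(colors))
--     return 2 * len(colors) + runs - 1
-- ===== Notes on version B (the rewrite author's own statement) =====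
-- stated objective: simpler
-- what changed: Replaces the per-adjacent-pair accumulation loop with a groupby pass counting maximal runs and the closed form 2*len(colors)+runs-1.
import Mathlib
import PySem

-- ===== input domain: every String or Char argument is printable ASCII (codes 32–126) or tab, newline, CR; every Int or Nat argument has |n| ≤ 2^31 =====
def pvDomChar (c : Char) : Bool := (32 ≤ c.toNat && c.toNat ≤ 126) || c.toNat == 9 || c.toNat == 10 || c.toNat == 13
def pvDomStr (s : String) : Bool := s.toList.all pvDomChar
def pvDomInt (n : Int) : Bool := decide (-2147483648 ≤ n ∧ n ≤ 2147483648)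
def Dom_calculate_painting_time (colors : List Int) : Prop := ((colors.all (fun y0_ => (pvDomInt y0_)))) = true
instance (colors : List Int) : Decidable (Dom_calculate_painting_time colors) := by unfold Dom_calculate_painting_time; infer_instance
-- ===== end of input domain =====

-- ===== PORT A =====
def calculate_painting_time (colors : List Int) : Int :=
  let result : Int := 2
  if colors = [] then 0
  else
    (PySem.List.pyRange 0 ((colors.length : Int) - 1) 1).foldl
      (fun result i =>
        if PySem.List.pyGetD colors i 0 = PySem.List.pyGetD colors (i + 1) 0 then
          result + 2
        else
          result + (2 + 1)) result

-- ===== PORT B =====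
-- 'sum(1 for _ in groupby(colors))': count the maximal runs of consecutive equal elements
def pvRuns : List Int → Int
  | [] => 0
  | [_] => 1
  | a :: b :: t => (if a = b then 0 else 1) + pvRuns (b :: t)

def calculate_painting_time_alt (colors : List Int) : Int :=
  if colors = [] then 0
  else 2 * (colors.length : Int) + pvRuns colors - 1

-- ===== PRECONDITION & SPEC =====
def Spec_calculate_painting_time (colors : List Int) (out : Int) : Prop := out = calculate_painting_time_alt colors
instance (colors : List Int) (out : Int) : Decidable (Spec_calculate_painting_time colors out) := by unfold Spec_calculate_painting_time; infer_instance

-- ===== CLAIM (what is proved, stated in full; the proofs are below) =====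
def Claim_equal_calculate_painting_time : Prop := ∀ (colors : List Int), Dom_calculate_painting_time colors → Spec_calculate_painting_time colors (calculate_painting_time colors)

-- ===== LEMMAS AND PROOFS =====

-- structural version of A's per-pair sum
def pvPairSum : List Int → Int
  | [] => 0
  | [_] => 0
  | a :: b :: t => (if a = b then (2:Int) else 3) + pvPairSum (b :: t)

theorem pvPairSum_eq_runs : ∀ (a : Int) (t : List Int),
    pvPairSum (a :: t) = 2 * (t.length : Int) + pvRuns (a :: t) - 1 := by
  intro a t
  induction t generalizing a with
  | nil => simp [pvPairSum, pvRuns]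
  | cons b t ih =>
    simp only [pvPairSum, pvRuns, ih b, List.length_cons]
    split_ifs <;> push_cast <;> ring

theorem pvSum_range_eq_pairSum : ∀ (xs : List Int),
    ((List.range (xs.length - 1)).map
      (fun k => if xs.getD k 0 = xs.getD (k + 1) 0 then (2:Int) else 3)).sum
    = pvPairSum xs := by
  intro xs
  match xs with
  | [] => simp [pvPairSum]
  | [a] => simp [pvPairSum]
  | a :: b :: t =>
    have h := pvSum_range_eq_pairSum (b :: t)
    simp only [List.length_cons, Nat.add_sub_cancel] at *
    rw [List.range_succ_eq_map]
    simp only [List.map_cons, List.map_map, List.sum_cons, pvPairSum]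
    rw [← h]
    congr 1

theorem pvFold_eq (xs : List Int) (init : Int) :
    (PySem.List.pyRange 0 ((xs.length : Int) - 1) 1).foldl
      (fun result i =>
        if PySem.List.pyGetD xs i 0 = PySem.List.pyGetD xs (i + 1) 0 then
          result + 2
        else
          result + (2 + 1)) init
    = init + pvPairSum xs := by
  have hb : ((xs.length : Int) - 1) = ((xs.length - 1 : Nat) : Int) ∨ xs = [] := by
    cases xs with
    | nil => right; rfl
    | cons a t => left; simp
  rcases hb with hb | hb
  · rw [hb, PySem.List.pyRange_zero_nat]
    rw [List.foldl_map]
    have : ∀ (ks : List Nat) (c : Int),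
        ks.foldl (fun result (k : Nat) =>
          if PySem.List.pyGetD xs (k : Int) 0 = PySem.List.pyGetD xs ((k : Int) + 1) 0 then
            result + 2
          else
            result + (2 + 1)) c
        = c + (ks.map (fun k => if xs.getD k 0 = xs.getD (k + 1) 0 then (2:Int) else 3)).sum := by
      intro ks
      induction ks with
      | nil => intro c; simp
      | cons k ks ih =>
        intro c
        simp only [List.foldl_cons, List.map_cons, List.sum_cons, ih]
        have h1 : PySem.List.pyGetD xs (k : Int) 0 = xs.getD k 0 := by
          simp [PySem.List.pyGetD_natCast]
        have h2 : PySem.List.pyGetD xs ((k : Int) + 1) 0 = xs.getD (k + 1) 0 := by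
          have : ((k : Int) + 1) = ((k + 1 : Nat) : Int) := by push_cast; ring
          rw [this, PySem.List.pyGetD_natCast]
        rw [h1, h2]
        split_ifs <;> ring
    rw [this, pvSum_range_eq_pairSum]
  · subst hb; simp [pvPairSum, PySem.List.pyRange]

-- ===== VERDICT (by name: the statement is the Claim_ definition above) =====
theorem calculate_painting_time_spec : Claim_equal_calculate_painting_time := by
  intro colors _
  unfold Spec_calculate_painting_time calculate_painting_time calculate_painting_time_alt
  cases colors with
  | nil => simp
  | cons a t =>
    rw [if_neg (by simp : ¬ (a :: t) = []), if_neg (by simp : ¬ (a :: t) = [])]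
    rw [pvFold_eq (a :: t) 2, pvPairSum_eq_runs a t]
    simp only [List.length_cons]
    push_cast
    ring
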